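-- pv_equiv track=rewrite | github.com/ravan6667/password-cracker-projects | password_checker_clean.py | _has_common_patterns
-- ===== SOURCE A (Python) =====
-- def _has_common_patterns(password):
--     # Check if password contains common weak patterns
--     # Args:
--     #     password (str): The password to check
--     # Returns:
--     #     bool: True if common patterns are found, False otherwise
--     common_patterns = [
--         r'123456',
--         r'password',
--         r'qwerty',
--         r'abc',
--         r'000',
--         r'111',
--         r'222',
--         r'333',
--         r'444',
--         r'555',
--         r'666',
--         r'777',
--         r'888',
--         r'999',
--         r'0000',
--         r'1111',
--         r'2222',
--         r'3333',
--         r'4444',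
--         r'5555',
--         r'6666',
--         r'7777',
--         r'8888',
--         r'9999',
--     ]
--
--     password_lower = password.lower()
--     for pattern in common_patterns:
--         if pattern in password_lower:
--             return True
--
--     return False
-- ===== SOURCE B (Python) =====
-- def _has_common_patterns(password):
--     # Four literal weak substrings; the 20 repeated-digit patterns of the original
--     # are equivalent to "three identical consecutive digits", found in one scan.
--     p = password.lower()
--     for lit in ('123456', 'password', 'qwerty', 'abc'):
--         if lit in p:
--             return True
--     for i in range(len(p) - 2):
--         if p[i].isdigit() and p[i] == p[i + 1] == p[i + 2]:
--             return True
--     return False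
-- ===== Notes on version B (the rewrite author's own statement) =====
-- stated objective: simpler
-- what changed: Replaces the 20 repeated-digit substring patterns ('000'..'999','0000'..'9999') with a single sliding-window scan for three identical consecutive digits (the 4-digit patterns are subsumed by the 3-digit ones), keeping only the four literal patterns as substring tests.
import Mathlib
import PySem

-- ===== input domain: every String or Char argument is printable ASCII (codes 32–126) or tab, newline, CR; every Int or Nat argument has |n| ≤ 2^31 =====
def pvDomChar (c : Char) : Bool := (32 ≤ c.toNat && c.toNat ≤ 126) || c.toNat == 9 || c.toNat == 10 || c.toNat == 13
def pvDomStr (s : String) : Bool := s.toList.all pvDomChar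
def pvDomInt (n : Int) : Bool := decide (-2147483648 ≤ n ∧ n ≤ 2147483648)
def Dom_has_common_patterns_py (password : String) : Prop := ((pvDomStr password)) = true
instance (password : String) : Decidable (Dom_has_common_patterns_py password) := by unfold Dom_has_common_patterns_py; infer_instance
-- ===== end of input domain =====

-- B replaces the 20 repeated-digit substring patterns by one sliding-window scan for
-- three identical consecutive digits (simpler; same return value everywhere).

-- ===== PORT A =====
def has_common_patterns_py (password : String) : Bool :=
  let common_patterns : List String :=
    ["123456", "password", "qwerty", "abc",
     "000", "111", "222", "333", "444", "555", "666", "777", "888", "999",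
     "0000", "1111", "2222", "3333", "4444", "5555", "6666", "7777", "8888", "9999"]
  let password_lower := PySem.Str.lower password
  -- 'for pattern in common_patterns: if pattern in password_lower: return True / return False'
  common_patterns.any (fun pattern => PySem.Str.isIn pattern password_lower)

-- ===== PORT B =====
-- Source B's index loop 'for i in range(len(p)-2): if p[i].isdigit() and p[i]==p[i+1]==p[i+2]'
-- as the same left-to-right window scan over the character list.
def pvScan3 : List Char → Bool
  | c1 :: c2 :: c3 :: rest =>
      if c1.isDigit && c1 == c2 && c2 == c3 then true else pvScan3 (c2 :: c3 :: rest)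
  | _ => false

def has_common_patterns_py_alt (password : String) : Bool :=
  let p := PySem.Str.lower password
  if (["123456", "password", "qwerty", "abc"].any (fun lit => PySem.Str.isIn lit p)) then
    true
  else
    pvScan3 p.toList

-- ===== PRECONDITION & SPEC =====
def Spec_has_common_patterns_py (password : String) (out : Bool) : Prop := out = has_common_patterns_py_alt password
instance (password : String) (out : Bool) : Decidable (Spec_has_common_patterns_py password out) := by unfold Spec_has_common_patterns_py; infer_instance

-- ===== CLAIM (what is proved, stated in full; the proofs are below) =====
def Claim_equal_has_common_patterns_py : Prop := ∀ (password : String), Dom_has_common_patterns_py password → Spec_has_common_patterns_py password (has_common_patterns_py password)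

-- ===== LEMMAS AND PROOFS =====

lemma pv_digit_cases (d : Char) (h : d.isDigit = true) :
    d = '0' ∨ d = '1' ∨ d = '2' ∨ d = '3' ∨ d = '4' ∨ d = '5' ∨ d = '6' ∨ d = '7' ∨ d = '8' ∨ d = '9' := by
  simp [Char.isDigit] at h
  obtain ⟨h1, h2⟩ := h
  have hv1 : 48 ≤ d.val.toNat := h1
  have hv2 : d.val.toNat ≤ 57 := h2
  interval_cases hn : d.val.toNat <;> simp_all [Char.ext_iff, UInt32.ext_iff]

lemma pv_no_triple_short (l : List Char) (hl : l.length < 3) :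
    ¬ ∃ d : Char, d.isDigit = true ∧ [d, d, d] <:+: l := by
  rintro ⟨d, -, h⟩
  have := h.length_le
  simp at this
  omega

-- pvScan3 fires exactly when some digit occurs three times in a row.
lemma pvScan3_iff (cs : List Char) :
    pvScan3 cs = true ↔ ∃ d : Char, d.isDigit = true ∧ [d, d, d] <:+: cs := by
  induction cs with
  | nil =>
    constructor
    · intro h; simp [pvScan3] at h
    · intro h; exact absurd h (pv_no_triple_short _ (by simp))
  | cons c rest ih =>
    cases rest with
    | nil =>
      constructor
      · intro h; simp [pvScan3] at h
      · intro h; exact absurd h (pv_no_triple_short _ (by simp))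
    | cons c2 rest2 =>
      cases rest2 with
      | nil =>
        constructor
        · intro h; simp [pvScan3] at h
        · intro h; exact absurd h (pv_no_triple_short _ (by simp))
      | cons c3 rs =>
        constructor
        · intro h
          rw [pvScan3] at h
          split_ifs at h with hc
          · simp only [Bool.and_eq_true, beq_iff_eq] at hc
            obtain ⟨⟨hd, h12⟩, h23⟩ := hc
            exact ⟨c, hd, [], rs, by simp [h12, h23]⟩
          · obtain ⟨d, hd, hinf⟩ := ih.mp h
            exact ⟨d, hd, hinf.trans (List.suffix_cons c _).isInfix⟩
        · rintro ⟨d, hd, hinf⟩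
          rw [pvScan3]
          rcases List.infix_cons_iff.mp hinf with hpre | htail
          · simp only [List.cons_prefix_cons] at hpre
            obtain ⟨h1, h2, h3, -⟩ := hpre
            subst h1
            simp [← h2, ← h3, hd]
          · have hrec := ih.mpr ⟨d, hd, htail⟩
            split_ifs <;> simp [hrec]

lemma pv_quad_to_triple (d : Char) {cs : List Char} (h : [d, d, d, d] <:+: cs) :
    [d, d, d] <:+: cs :=
  (List.IsInfix.trans ⟨[], [d], by simp⟩ h)

-- ===== VERDICT (by name: the statement is the Claim_ definition above) =====
theorem has_common_patterns_py_spec : Claim_equal_has_common_patterns_py := by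
  intro password _
  unfold Spec_has_common_patterns_py has_common_patterns_py has_common_patterns_py_alt
  rw [Bool.eq_iff_iff]
  simp only [List.any_cons, List.any_nil, Bool.or_false, Bool.if_true_left,
    Bool.or_eq_true, decide_eq_true_eq, PySem.Str.isIn_iff_infix, pvScan3_iff]
  set cs := (PySem.Str.lower password).toList with hcs
  constructor
  · rintro (h | h | h | h | h | h | h | h | h | h | h | h | h | h |
            h | h | h | h | h | h | h | h | h | h)
    · exact Or.inl (Or.inl h)
    · exact Or.inl (Or.inr (Or.inl h))
    · exact Or.inl (Or.inr (Or.inr (Or.inl h)))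
    · exact Or.inl (Or.inr (Or.inr (Or.inr h)))
    · exact Or.inr ⟨'0', rfl, h⟩
    · exact Or.inr ⟨'1', rfl, h⟩
    · exact Or.inr ⟨'2', rfl, h⟩
    · exact Or.inr ⟨'3', rfl, h⟩
    · exact Or.inr ⟨'4', rfl, h⟩
    · exact Or.inr ⟨'5', rfl, h⟩
    · exact Or.inr ⟨'6', rfl, h⟩
    · exact Or.inr ⟨'7', rfl, h⟩
    · exact Or.inr ⟨'8', rfl, h⟩
    · exact Or.inr ⟨'9', rfl, h⟩
    · exact Or.inr ⟨'0', rfl, pv_quad_to_triple _ h⟩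
    · exact Or.inr ⟨'1', rfl, pv_quad_to_triple _ h⟩
    · exact Or.inr ⟨'2', rfl, pv_quad_to_triple _ h⟩
    · exact Or.inr ⟨'3', rfl, pv_quad_to_triple _ h⟩
    · exact Or.inr ⟨'4', rfl, pv_quad_to_triple _ h⟩
    · exact Or.inr ⟨'5', rfl, pv_quad_to_triple _ h⟩
    · exact Or.inr ⟨'6', rfl, pv_quad_to_triple _ h⟩
    · exact Or.inr ⟨'7', rfl, pv_quad_to_triple _ h⟩
    · exact Or.inr ⟨'8', rfl, pv_quad_to_triple _ h⟩
    · exact Or.inr ⟨'9', rfl, pv_quad_to_triple _ h⟩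
  · rintro ((h | h | h | h) | ⟨d, hd, h⟩)
    · exact Or.inl h
    · exact Or.inr (Or.inl h)
    · exact Or.inr (Or.inr (Or.inl h))
    · exact Or.inr (Or.inr (Or.inr (Or.inl h)))
    · rcases pv_digit_cases d hd with
        (rfl | rfl | rfl | rfl | rfl | rfl | rfl | rfl | rfl | rfl)
      · exact Or.inr (Or.inr (Or.inr (Or.inr (Or.inl h))))
      · exact Or.inr (Or.inr (Or.inr (Or.inr (Or.inr (Or.inl h)))))
      · exact Or.inr (Or.inr (Or.inr (Or.inr (Or.inr (Or.inr (Or.inl h))))))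
      · exact Or.inr (Or.inr (Or.inr (Or.inr (Or.inr (Or.inr (Or.inr (Or.inl h)))))))
      · exact Or.inr (Or.inr (Or.inr (Or.inr (Or.inr (Or.inr (Or.inr (Or.inr (Or.inl h))))))))
      · exact Or.inr (Or.inr (Or.inr (Or.inr (Or.inr (Or.inr (Or.inr (Or.inr (Or.inr (Or.inl h)))))))))
      · exact Or.inr (Or.inr (Or.inr (Or.inr (Or.inr (Or.inr (Or.inr (Or.inr (Or.inr (Or.inr (Or.inl h))))))))))
      · exact Or.inr (Or.inr (Or.inr (Or.inr (Or.inr (Or.inr (Or.inr (Or.inr (Or.inr (Or.inr (Or.inr (Or.inl h)))))))))))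
      · exact Or.inr (Or.inr (Or.inr (Or.inr (Or.inr (Or.inr (Or.inr (Or.inr (Or.inr (Or.inr (Or.inr (Or.inr (Or.inl h))))))))))))
      · exact Or.inr (Or.inr (Or.inr (Or.inr (Or.inr (Or.inr (Or.inr (Or.inr (Or.inr (Or.inr (Or.inr (Or.inr (Or.inr (Or.inl h)))))))))))))
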